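-- pv_equiv track=rewrite | github.com/msaeed027/codeforces | cf.D.FightWithMonsters.py | max_points_num
-- ===== SOURCE A (Python) =====
-- def calc_skip_val(a, b, h_i):
--     r = h_i % (a + b)
--     if 1 <= r <= a:
--         return 0
--     else:
--         if r == 0:
--             r = b
--         else:
--             r -= a
--     return int(r / a) + (0 if r % a == 0 else 1)
--
-- def create_skip_table(a, b, h):
--     return list(
--         map(
--             lambda h_i: calc_skip_val(a, b, h_i),
--             h
--         )
--     )
--
-- def max_points_num(a, b, k, h):
--     skip_table = create_skip_table(a, b, h)
--     skip_table.sort()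
--
--     p = 0
--     for s_i in skip_table:
--         if s_i <= k:
--             k -= s_i
--             p += 1
--         else:
--             break
--
--     return p
-- ===== SOURCE B (Python) =====
-- def _skip_cost(a, b, x):
--     r = x % (a + b)
--     if 1 <= r <= a:
--         return 0
--     if r == 0:
--         r = b
--     else:
--         r -= a
--     return int(r / a) + (0 if r % a == 0 else 1)
--
--
-- def max_points_num(a, b, k, h):
--     # Bucket the monsters by their skip cost in a dict, then walk the distinct
--     # costs in increasing order taking whole groups at once: a group of m
--     # monsters of positive cost c yields min(m, k // c) kills by one division
--     # instead of m per-monster budget decrements.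
--     counts = {}
--     for x in h:
--         c = _skip_cost(a, b, x)
--         counts[c] = counts.get(c, 0) + 1
--
--     p = 0
--     for c in sorted(counts):
--         m = counts[c]
--         if c > k:
--             break
--         if c <= 0:
--             p += m
--             k -= c * m
--         else:
--             t = min(m, k // c)
--             p += t
--             k -= t * c
--             if t < m:
--                 break
--     return p
-- ===== Notes on version B (the rewrite author's own statement) =====
-- stated objective: alternative
-- what changed: Instead of sorting all n per-monster costs and decrementing the budget one monster at a time, B buckets the monsters by skip cost in a dict and walks only the distinct costs in increasing order, taking each whole equal-cost group at once with a single division min(m, k // c).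
import Mathlib
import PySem

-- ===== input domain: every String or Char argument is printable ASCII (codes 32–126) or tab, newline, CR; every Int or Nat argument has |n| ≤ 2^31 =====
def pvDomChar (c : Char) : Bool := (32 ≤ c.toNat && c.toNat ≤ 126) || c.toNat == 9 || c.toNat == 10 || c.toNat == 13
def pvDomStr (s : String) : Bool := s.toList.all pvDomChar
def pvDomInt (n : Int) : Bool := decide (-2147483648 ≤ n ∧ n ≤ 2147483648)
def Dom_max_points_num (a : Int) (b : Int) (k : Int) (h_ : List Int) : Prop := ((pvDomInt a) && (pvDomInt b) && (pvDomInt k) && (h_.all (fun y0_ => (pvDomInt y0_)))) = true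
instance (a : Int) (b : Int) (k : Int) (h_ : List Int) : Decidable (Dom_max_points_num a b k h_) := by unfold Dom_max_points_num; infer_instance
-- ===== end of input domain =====

-- B replaces A's sort of all n costs plus per-monster decrement loop by a dict of
-- cost multiplicities whose distinct costs are walked in increasing order, taking a
-- whole group of equal-cost monsters at once with one division (objective: alternative).

-- ===== PORT A =====
-- int(r / a): float division then truncation toward zero; exact trunc division for the
-- magnitudes Dom admits (|r| < 2^33, |a| ≤ 2^31) — ported with PySem.Int.truncdiv.
def calcSkipVal (a : Int) (b : Int) (h_i : Int) : Int :=
  let r := PySem.Int.mod h_i (a + b)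
  if 1 ≤ r ∧ r ≤ a then 0
  else
    let r := if r = 0 then b else r - a
    PySem.Int.truncdiv r a + (if PySem.Int.mod r a = 0 then 0 else 1)

def createSkipTable (a : Int) (b : Int) (h : List Int) : List Int :=
  h.map (fun h_i => calcSkipVal a b h_i)

-- the 'for s_i in skip_table: if s_i <= k: k -= s_i; p += 1 else: break' loop
def mpLoopA : Int → Int → List Int → Int
  | _, p, [] => p
  | k, p, s_i :: rest => if s_i ≤ k then mpLoopA (k - s_i) (p + 1) rest else p

def max_points_num (a : Int) (b : Int) (k : Int) (h_ : List Int) : Int :=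
  let skipTable := PySem.List.sorted (createSkipTable a b h_) (fun x => x) false
  mpLoopA k 0 skipTable

-- ===== PORT B =====
def skipCostB (a : Int) (b : Int) (x : Int) : Int :=
  let r := PySem.Int.mod x (a + b)
  if 1 ≤ r ∧ r ≤ a then 0
  else
    let r := if r = 0 then b else r - a
    PySem.Int.truncdiv r a + (if PySem.Int.mod r a = 0 then 0 else 1)

-- 'for c in sorted(counts): …' — group-at-a-time greedy over the distinct costs
def mpLoopB (d : PySem.Dict Int Int) : Int → Int → List Int → Int
  | _, p, [] => p
  | k, p, c :: rest =>
    let m := d.getD c 0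
    if c > k then p
    else if c ≤ 0 then mpLoopB d (k - c * m) (p + m) rest
    else
      let t := min m (PySem.Int.floordiv k c)
      if t < m then p + t
      else mpLoopB d (k - t * c) (p + t) rest

def max_points_num_alt (a : Int) (b : Int) (k : Int) (h_ : List Int) : Int :=
  let counts := h_.foldl
    (fun d x =>
      let c := skipCostB a b x
      d.insert c (d.getD c 0 + 1))
    PySem.Dict.empty
  mpLoopB counts k 0 (PySem.List.sorted counts.keys (fun x => x) false)

-- ===== PRECONDITION & SPEC =====
-- Exactly where Python A returns: on a nonempty monster list, a + b = 0 raises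
-- ZeroDivisionError at h_i % (a + b), and a = 0 raises it at r / a.
def Pre_max_points_num (a : Int) (b : Int) (k : Int) (h_ : List Int) : Prop :=
  h_ = [] ∨ (a ≠ 0 ∧ a + b ≠ 0)
instance (a : Int) (b : Int) (k : Int) (h_ : List Int) : Decidable (Pre_max_points_num a b k h_) := by unfold Pre_max_points_num; infer_instance

def pvWitness_max_points_num : Int × Int × Int × List Int := (2, 3, 1, [7, 11, 4])

def Spec_max_points_num (a : Int) (b : Int) (k : Int) (h_ : List Int) (out : Int) : Prop := out = max_points_num_alt a b k h_
instance (a : Int) (b : Int) (k : Int) (h_ : List Int) (out : Int) : Decidable (Spec_max_points_num a b k h_ out) := by unfold Spec_max_points_num; infer_instance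

-- ===== CLAIM (what is proved, stated in full; the proofs are below) =====
def Claim_equal_max_points_num : Prop := ∀ (a : Int) (b : Int) (k : Int) (h_ : List Int), Dom_max_points_num a b k h_ → Pre_max_points_num a b k h_ → Spec_max_points_num a b k h_ (max_points_num a b k h_)

-- ===== LEMMAS AND PROOFS =====

-- A's loop on a block of m ≥ 1 copies of an unaffordable cost c stops at once.
theorem mpLoopA_replicate_break (c : Int) (m : Nat) (hm : 0 < m) (R : List Int)
    (k p : Int) (hk : k < c) :
    mpLoopA k p (List.replicate m c ++ R) = p := by
  cases m with
  | zero => omega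
  | succ n =>
    have : ¬ c ≤ k := by omega
    simp [List.replicate_succ, mpLoopA, this]

-- A's loop on a block of affordable nonpositive cost c takes all m copies.
theorem mpLoopA_replicate_nonpos (c : Int) (hc : c ≤ 0) (R : List Int) :
    ∀ (m : Nat) (k p : Int), c ≤ k →
      mpLoopA k p (List.replicate m c ++ R) = mpLoopA (k - c * m) (p + m) R := by
  intro m
  induction m with
  | zero => intro k p _; simp
  | succ n ih =>
    intro k p hk
    have h1 : c ≤ k - c := by omega
    have e1 : k - c - c * n = k - c * (n + 1 : Nat) := by push_cast; ring
    have e2 : p + 1 + n = p + (n + 1 : Nat) := by push_cast; ring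
    simp only [List.replicate_succ, List.cons_append, mpLoopA, hk, if_pos]
    rw [ih (k - c) (p + 1) h1, e1, e2]

-- A's loop on a block of m copies of a positive cost c takes
-- min(m, max(0, k // c)) of them and stops if that is short of m.
theorem mpLoopA_replicate_pos (c : Int) (hc : 0 < c) (R : List Int) :
    ∀ (m : Nat) (k p : Int),
      mpLoopA k p (List.replicate m c ++ R) =
        (if min (m : Int) (max 0 (PySem.Int.floordiv k c)) < (m : Int)
         then p + min (m : Int) (max 0 (PySem.Int.floordiv k c))
         else mpLoopA (k - min (m : Int) (max 0 (PySem.Int.floordiv k c)) * c)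
                (p + min (m : Int) (max 0 (PySem.Int.floordiv k c))) R) := by
  intro m
  induction m with
  | zero =>
    intro k p
    simp
  | succ n ih =>
    intro k p
    have hqr := PySem.Int.floordiv_mul_add_mod k c
    have hr0 := PySem.Int.mod_nonneg k hc
    have hrc := PySem.Int.mod_lt k hc
    by_cases hk : c ≤ k
    · -- q ≥ 1
      have hq1 : 1 ≤ PySem.Int.floordiv k c := by
        by_contra hq
        push_neg at hq
        have : PySem.Int.floordiv k c * c ≤ 0 :=
          mul_nonpos_iff.mpr (Or.inr ⟨by omega, le_of_lt hc⟩)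
        omega
      -- floor((k - c)/c) = floor(k/c) - 1
      have hstep : PySem.Int.floordiv (k - c) c = PySem.Int.floordiv k c - 1 := by
        rw [PySem.Int.floordiv_eq_iff_of_pos hc]
        constructor <;> nlinarith [hqr, hr0, hrc]
      simp only [List.replicate_succ, List.cons_append, mpLoopA, hk, if_pos]
      rw [ih (k - c) (p + 1), hstep]
      have hmax : max 0 (PySem.Int.floordiv k c) = PySem.Int.floordiv k c := by omega
      have hmax' : max 0 (PySem.Int.floordiv k c - 1) = PySem.Int.floordiv k c - 1 := by omega
      rw [hmax, hmax']
      set q := PySem.Int.floordiv k c with hq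
      have ht : min ((n + 1 : Nat) : Int) q = min (n : Int) (q - 1) + 1 := by
        push_cast; omega
      rw [ht]
      have hcond : (min (n : Int) (q - 1) + 1 < ((n + 1 : Nat) : Int)) ↔
          (min (n : Int) (q - 1) < (n : Int)) := by push_cast; omega
      by_cases hlt : min (n : Int) (q - 1) < (n : Int)
      · rw [if_pos hlt, if_pos (hcond.mpr hlt)]; ring
      · rw [if_neg hlt, if_neg (fun h => hlt (hcond.mp h))]
        have e1 : k - c - min (n : Int) (q - 1) * c = k - (min (n : Int) (q - 1) + 1) * c := by ring
        have e2 : p + 1 + min (n : Int) (q - 1) = p + (min (n : Int) (q - 1) + 1) := by ring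
        rw [e1, e2]
    · -- k < c so q ≤ 0, nothing is taken
      have hq0 : PySem.Int.floordiv k c ≤ 0 := by
        by_contra hq
        push_neg at hq
        have : c ≤ PySem.Int.floordiv k c * c := le_mul_of_one_le_left (le_of_lt hc) (by omega)
        omega
      have hmax : max 0 (PySem.Int.floordiv k c) = 0 := by omega
      have hmin : min ((n + 1 : Nat) : Int) 0 = 0 := by push_cast; omega
      have hlt : (0 : Int) < ((n + 1 : Nat) : Int) := by push_cast; omega
      have : ¬ c ≤ k := hk
      simp only [List.replicate_succ, List.cons_append, mpLoopA, this, hmax, hmin]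
      rw [if_pos hlt]
      simp

-- counting the elements of a flatMap of replicate-blocks over a Nodup list
theorem count_expand (cs : List Int) :
    ∀ (l : List Int), l.Nodup → ∀ v : Int,
      (l.flatMap (fun c => List.replicate (cs.count c) c)).count v =
        if v ∈ l then cs.count v else 0 := by
  intro l
  induction l with
  | nil => intro _ v; simp
  | cons c t ih =>
    intro hnd v
    have hndt := (List.nodup_cons.mp hnd).2
    have hct := (List.nodup_cons.mp hnd).1
    simp only [List.flatMap_cons, List.count_append, List.count_replicate, ih hndt v,
      List.mem_cons]
    by_cases hv : v = c
    · subst hv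
      simp [hct]
    · simp [hv, Ne.symm hv]

-- a flatMap of replicate-blocks over a strictly increasing list is sorted (≤)
theorem pairwise_expand (cs : List Int) :
    ∀ (l : List Int), l.Pairwise (· < ·) →
      (l.flatMap (fun c => List.replicate (cs.count c) c)).Pairwise (· ≤ ·) := by
  intro l
  induction l with
  | nil => intro _; simp
  | cons c t ih =>
    intro hp
    have hp' := (List.pairwise_cons.mp hp).2
    have hclt := (List.pairwise_cons.mp hp).1
    simp only [List.flatMap_cons]
    apply List.pairwise_append.mpr
    refine ⟨List.pairwise_replicate.mpr (Or.inr le_rfl), ih hp', ?_⟩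
    intro x hx y hy
    have hxc : x = c := List.eq_of_mem_replicate hx
    rw [List.mem_flatMap] at hy
    obtain ⟨cc, hcc, hy2⟩ := hy
    have hyc : y = cc := List.eq_of_mem_replicate hy2
    rw [hxc, hyc]
    exact le_of_lt (hclt cc hcc)

-- B's group loop equals A's per-element loop on the expanded block list,
-- provided the dict reports each listed cost's true multiplicity in cs.
theorem mpLoopB_eq_mpLoopA (d : PySem.Dict Int Int) (cs : List Int) :
    ∀ (l : List Int) (k p : Int),
      (∀ c ∈ l, d.getD c 0 = (cs.count c : Int) ∧ c ∈ cs) →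
      mpLoopB d k p l = mpLoopA k p (l.flatMap (fun c => List.replicate (cs.count c) c)) := by
  intro l
  induction l with
  | nil => intro k p _; simp [mpLoopB, mpLoopA]
  | cons c t ih =>
    intro k p hall
    obtain ⟨hm, hmem⟩ := hall c (by simp)
    have hrest : ∀ c' ∈ t, d.getD c' 0 = (cs.count c' : Int) ∧ c' ∈ cs := by
      intro c' hc'; exact hall c' (by simp [hc'])
    have hpos : 0 < cs.count c := List.count_pos_iff.mpr hmem
    simp only [List.flatMap_cons]
    by_cases hck : c > k
    · rw [mpLoopA_replicate_break c _ hpos _ k p hck]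
      simp [mpLoopB, hck]
    · push_neg at hck
      by_cases hc0 : c ≤ 0
      · rw [mpLoopA_replicate_nonpos c hc0 _ _ k p hck]
        simp only [mpLoopB, hm, if_neg (by omega : ¬ c > k), if_pos hc0]
        exact ih (k - c * (cs.count c : Int)) (p + (cs.count c : Int)) hrest
      · push_neg at hc0
        rw [mpLoopA_replicate_pos c hc0 _ (cs.count c) k p]
        -- k ≥ c > 0 ⇒ floordiv k c ≥ 1 ⇒ the max 0 is inert
        have hq1 : 1 ≤ PySem.Int.floordiv k c := by
          have hqr := PySem.Int.floordiv_mul_add_mod k c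
          have hr0 := PySem.Int.mod_nonneg k hc0
          have hrc := PySem.Int.mod_lt k hc0
          by_contra hq
          push_neg at hq
          have : PySem.Int.floordiv k c * c ≤ 0 :=
            mul_nonpos_iff.mpr (Or.inr ⟨by omega, le_of_lt hc0⟩)
          omega
        have hmax : max 0 (PySem.Int.floordiv k c) = PySem.Int.floordiv k c := by omega
        rw [hmax]
        simp only [mpLoopB, hm, if_neg (by omega : ¬ c > k), if_neg (by omega : ¬ c ≤ 0)]
        by_cases hlt : min ((cs.count c : Nat) : Int) (PySem.Int.floordiv k c) < ((cs.count c : Nat) : Int)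
        · rw [if_pos hlt, if_pos hlt]
        · rw [if_neg hlt, if_neg hlt]
          exact ih _ _ hrest

theorem max_points_num_spec : Claim_equal_max_points_num := by
  intro a b k h_ _ _
  show max_points_num a b k h_ = max_points_num_alt a b k h_
  have hd : (h_.foldl
      (fun d x =>
        let c := skipCostB a b x
        d.insert c (d.getD c 0 + 1))
      PySem.Dict.empty) = PySem.Dict.counter (h_.map (fun x => skipCostB a b x)) := by
    rw [← PySem.Dict.foldl_insert_getD_add_one_eq_counter, List.foldl_map]
  simp only [max_points_num, max_points_num_alt, createSkipTable]
  have hfun : (fun h_i => calcSkipVal a b h_i) = (fun x => skipCostB a b x) := rfl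
  rw [hfun, hd, PySem.Dict.keys_counter]
  set cs := h_.map (fun x => skipCostB a b x) with hcs
  set sk := PySem.List.sorted (PySem.Set.ofList cs) (fun x => x) false with hsk
  have hsklt : sk.Pairwise (· < ·) := by
    rw [hsk]; exact PySem.List.sorted_ofList_pairwise_lt cs
  have hsknd : sk.Nodup := hsklt.imp (fun h => ne_of_lt h)
  have hmemsk : ∀ v : Int, v ∈ sk ↔ v ∈ cs := by
    intro v
    rw [hsk, PySem.List.mem_sorted, PySem.Set.mem_ofList]
  -- the sorted cost table is the concatenation of the replicate blocks over sk
  have hsorted : PySem.List.sorted cs (fun x => x) false =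
      sk.flatMap (fun c => List.replicate (cs.count c) c) := by
    apply PySem.List.sorted_id_eq_of_perm_of_pairwise
    · apply List.perm_iff_count.mpr
      intro v
      rw [count_expand cs sk hsknd v]
      by_cases hv : v ∈ sk
      · rw [if_pos hv]
      · rw [if_neg hv]
        exact (List.count_eq_zero.mpr (fun h => hv ((hmemsk v).mpr h))).symm
    · exact pairwise_expand cs sk hsklt
  rw [hsorted]
  apply (mpLoopB_eq_mpLoopA (PySem.Dict.counter cs) cs sk k 0 ?_).symm
  intro c hc
  exact ⟨PySem.Dict.getD_counter cs c, (hmemsk c).mp hc⟩
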